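-- pv_equiv track=rewrite | github.com/talavis/advent-of-code | 2018/6_dist.py | calc_max_area
-- ===== SOURCE A (Python) =====
-- import collections
--
-- def find_shortest_dist(goal, coords):
--     best_dist = (float('inf'))
--     best_coord = []
--     for coord in coords:
--         dist = abs(coord[0]-goal[0]) + abs(coord[1]-goal[1])
--         if dist < best_dist:
--             best_dist = dist
--             best_coord = [coord]
--         elif dist == best_dist:
--             best_coord.append(coord)
--     return best_coord
--
-- def find_edges(board):
--     edges = set()
--     edges.add('.')
--
--     for col in board[0]:
--         edges.add(str(col))
--     for col in board[-1]:
--         edges.add(str(col))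
--     for row in board[1:-1]:
--         edges.add(str(row[0]))
--         edges.add(str(row[-1]))
--     return edges
--
-- def calc_max_area(coords):
--     coords.sort()
--     board_max = (max(i[0] for i in coords), max(i[1] for i in coords))
--     board = [[0]*(board_max[0]+1) for i in range(board_max[1]+1)]
--     for i in range(len(board)):
--         for j in range(len(board[0])):
--             tmp = find_shortest_dist((j, i), coords)
--             if len(tmp) == 1:
--                 board[i][j] = tmp
--             else:
--                 board[i][j] = '.'
--     flattened = [str(i) for sub in board for i in sub]
--     counter = collections.Counter(flattened)
--     edges = find_edges(board)
--     for edge in edges: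
--         counter[edge] = 0
--     return max(counter.values())
-- ===== SOURCE B (Python) =====
-- def calc_max_area(coords):
--     mx = max(c[0] for c in coords)
--     my = max(c[1] for c in coords)
--     cells = [(x, y) for y in range(my + 1) for x in range(mx + 1)]
--
--     def wins(c, p):
--         # c strictly dominates every other entry at p: exactly one entry
--         # (necessarily c itself) lies within c's distance of p
--         d = abs(c[0] - p[0]) + abs(c[1] - p[1])
--         return sum(1 for o in coords if abs(o[0] - p[0]) + abs(o[1] - p[1]) <= d) == 1
--
--     best = 0
--     for c in coords:
--         won = [p for p in cells if wins(c, p)]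
--         if not any(p[0] == 0 or p[0] == mx or p[1] == 0 or p[1] == my for p in won):
--             best = max(best, len(won))
--     return best
-- ===== Notes on version B (the rewrite author's own statement) =====
-- stated objective: alternative
-- what changed: B inverts the traversal: instead of labelling every grid cell with its nearest coordinate and counting labels through a board/Counter/edge-set, it loops over the coordinates and, for each candidate, counts the cells it strictly dominates (exactly one entry within its distance) and discards the candidate if any dominated cell lies on the border, taking a running max.
import Mathlib
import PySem

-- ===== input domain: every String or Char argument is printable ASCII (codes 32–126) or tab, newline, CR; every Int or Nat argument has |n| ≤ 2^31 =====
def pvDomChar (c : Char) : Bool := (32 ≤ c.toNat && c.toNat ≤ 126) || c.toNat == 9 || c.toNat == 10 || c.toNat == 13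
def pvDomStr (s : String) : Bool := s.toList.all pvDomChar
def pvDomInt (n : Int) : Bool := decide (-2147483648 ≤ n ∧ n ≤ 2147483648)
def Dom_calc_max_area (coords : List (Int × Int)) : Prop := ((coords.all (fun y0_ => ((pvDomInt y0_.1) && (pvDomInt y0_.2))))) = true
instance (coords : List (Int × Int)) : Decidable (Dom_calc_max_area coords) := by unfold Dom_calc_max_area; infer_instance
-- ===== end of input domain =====

-- B inverts A's traversal: no board, no string labels, no Counter, no edge set — it loops over
-- the CANDIDATE COORDINATES and counts, for each, the grid cells it strictly dominates,
-- discarding candidates that dominate a border cell (return-value equivalence only: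
-- the Python A sorts its argument list in place, B does not).

-- ===== PORT A =====
def find_shortest_dist (goal : Int × Int) (coords : List (Int × Int)) : List (Int × Int) :=
  (coords.foldl (fun st c =>
      let d := |c.1 - goal.1| + |c.2 - goal.2|
      match st.1 with
      | none => (some d, [c])
      | some bd =>
        if d < bd then (some d, [c])
        else if d == bd then (some bd, st.2 ++ [c])
        else st)
    ((none : Option Int), ([] : List (Int × Int)))).2

-- str() of a board cell: str([coord]) = "[(x, y)]", str('.') = "." (kept as List Char)
def pvLabel : Option (Int × Int) → List Char
  | none => ['.']
  | some (x, y) =>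
      '[' :: '(' :: (PySem.Int.toChars x ++ ',' :: ' ' :: (PySem.Int.toChars y ++ [')', ']']))

def find_edges (board : List (List (Option (Int × Int)))) : PySem.Set (List Char) :=
  let e0 := PySem.Set.add PySem.Set.empty ['.']
  let e1 := ((PySem.List.pyGet? board 0).getD []).foldl (fun s col => PySem.Set.add s (pvLabel col)) e0
  let e2 := ((PySem.List.pyGet? board (-1)).getD []).foldl (fun s col => PySem.Set.add s (pvLabel col)) e1
  (PySem.List.slice board (some 1) (some (-1))).foldl
    (fun s row =>
      PySem.Set.add (PySem.Set.add s (pvLabel ((PySem.List.pyGet? row 0).getD none)))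
        (pvLabel ((PySem.List.pyGet? row (-1)).getD none))) e2

def calc_max_area (coords : List (Int × Int)) : Int :=
  let scoords := PySem.List.sorted2 coords (fun c => c.1) (fun c => c.2) false
  let board_max : Int × Int :=
    ((PySem.List.max? (scoords.map (fun c => c.1)) (fun v => v)).getD 0,
     (PySem.List.max? (scoords.map (fun c => c.2)) (fun v => v)).getD 0)
  let board : List (List (Option (Int × Int))) :=
    (PySem.List.pyRange 0 (board_max.2 + 1) 1).map (fun i =>
      (PySem.List.pyRange 0 (board_max.1 + 1) 1).map (fun j =>
        let tmp := find_shortest_dist (j, i) scoords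
        if tmp.length == 1 then some (tmp.headD (0, 0)) else none))
  let flattened := board.flatMap (fun sub => sub.map pvLabel)
  let counter := PySem.Dict.counter flattened
  let edges := find_edges board
  let counter2 := edges.foldl (fun d e => d.insert e (0 : Int)) counter
  (PySem.List.max? counter2.values (fun v => v)).getD 0

-- ===== PORT B =====
-- the comprehension [(x, y) for y in range(my+1) for x in range(mx+1)]
def altCells (mx my : Int) : List (Int × Int) :=
  (PySem.List.pyRange 0 (my + 1) 1).flatMap (fun y =>
    (PySem.List.pyRange 0 (mx + 1) 1).map (fun x => (x, y)))

-- wins(c, p): sum(1 for o in coords if d(o,p) <= d(c,p)) == 1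
def altWins (coords : List (Int × Int)) (c p : Int × Int) : Bool :=
  coords.countP (fun o => |o.1 - p.1| + |o.2 - p.2| ≤ |c.1 - p.1| + |c.2 - p.2|) == 1

def calc_max_area_alt (coords : List (Int × Int)) : Int :=
  let mx := (PySem.List.max? (coords.map (fun c => c.1)) (fun v => v)).getD 0
  let my := (PySem.List.max? (coords.map (fun c => c.2)) (fun v => v)).getD 0
  let cells := altCells mx my
  coords.foldl (fun best c =>
    let won := cells.filter (altWins coords c)
    if won.any (fun p => p.1 == 0 || p.1 == mx || p.2 == 0 || p.2 == my) then best
    else max best (won.length : Int)) 0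

-- ===== PRECONDITION & SPEC =====
-- Pre_ excludes exactly the inputs on which the Python A raises: the empty list (max() of an
-- empty generator is a ValueError) and the coordinate lists whose board degenerates so that
-- find_edges indexes an empty list (all y < 0, or all x < 0 with some y ≥ 2: IndexError).
def Pre_calc_max_area (coords : List (Int × Int)) : Prop :=
  coords ≠ [] ∧ (∃ c ∈ coords, 0 ≤ c.2) ∧
    ((∃ c ∈ coords, 0 ≤ c.1) ∨ (∀ c ∈ coords, c.2 ≤ 1))
instance (coords : List (Int × Int)) : Decidable (Pre_calc_max_area coords) := by
  unfold Pre_calc_max_area; infer_instance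

def pvWitness_calc_max_area : (List (Int × Int)) := [(1, 1), (0, 0)]

def Spec_calc_max_area (coords : List (Int × Int)) (out : Int) : Prop := out = calc_max_area_alt coords
instance (coords : List (Int × Int)) (out : Int) : Decidable (Spec_calc_max_area coords out) := by
  unfold Spec_calc_max_area; infer_instance

-- ===== CLAIM (what is proved, stated in full; the proofs are below) =====
def Claim_equal_calc_max_area : Prop := ∀ (coords : List (Int × Int)), Dom_calc_max_area coords → Pre_calc_max_area coords → Spec_calc_max_area coords (calc_max_area coords)

-- ===== LEMMAS AND PROOFS =====

-- ---- Section 1: injectivity of the str() label ----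

lemma pvDigitChar_inj {m n : Nat} (hm : m < 10) (hn : n < 10)
    (h : Nat.digitChar m = Nat.digitChar n) : m = n := by
  interval_cases m <;> interval_cases n <;> first | rfl | (exact absurd h (by decide))

lemma pvToDigits_inj : ∀ m n : Nat, Nat.toDigits 10 m = Nat.toDigits 10 n → m = n := by
  intro m
  induction m using Nat.strong_induction_on with
  | _ m IH =>
    intro n h
    rw [Nat.toDigits_eq_if (by norm_num)] at h
    rw [Nat.toDigits_eq_if (b := 10) (n := n) (by norm_num)] at h
    split_ifs at h with h1 h2 h2
    · exact pvDigitChar_inj h1 h2 (List.cons.inj h).1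
    · exfalso
      have hl := congrArg List.length h
      simp only [List.length_cons, List.length_append, List.length_nil] at hl
      have hp := @Nat.length_toDigits_pos 10 (n / 10)
      omega
    · exfalso
      have hl := congrArg List.length h
      simp only [List.length_cons, List.length_append, List.length_nil] at hl
      have hp := @Nat.length_toDigits_pos 10 (m / 10)
      omega
    · have h' := List.append_inj' h (by simp)
      have hm10 : m / 10 = n / 10 := IH (m / 10) (by omega) _ h'.1
      have hmod : m % 10 = n % 10 := by
        have := h'.2
        simp at this
        exact pvDigitChar_inj (Nat.mod_lt _ (by norm_num)) (Nat.mod_lt _ (by norm_num)) this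
      omega

lemma pvToDigits_isDigit {n : Nat} {c : Char} (h : c ∈ Nat.toDigits 10 n) : c.isDigit = true :=
  Nat.isDigit_of_mem_toDigits (by norm_num) (by norm_num) h

lemma pvToDigits_ne_nil (n : Nat) : Nat.toDigits 10 n ≠ [] := by
  intro h
  have := @Nat.length_toDigits_pos 10 n
  simp [h] at this

lemma pvToChars_inj : ∀ a b : Int, PySem.Int.toChars a = PySem.Int.toChars b → a = b := by
  intro a b h
  unfold PySem.Int.toChars at h
  split_ifs at h with ha hb hb
  · have h' : Nat.toDigits 10 a.natAbs = Nat.toDigits 10 b.natAbs := List.tail_eq_of_cons_eq h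
    have := pvToDigits_inj _ _ h'
    omega
  · exfalso
    rcases e : Nat.toDigits 10 b.toNat with _ | ⟨c, t⟩
    · exact pvToDigits_ne_nil _ e
    · rw [e] at h
      have hc : c = '-' := (List.cons.inj h).1.symm
      have := pvToDigits_isDigit (e ▸ List.mem_cons_self ..)
      rw [hc] at this
      exact absurd this (by decide)
  · exfalso
    rcases e : Nat.toDigits 10 a.toNat with _ | ⟨c, t⟩
    · exact pvToDigits_ne_nil _ e
    · rw [e] at h
      have hc : c = '-' := (List.cons.inj h).1
      have := pvToDigits_isDigit (e ▸ List.mem_cons_self ..)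
      rw [hc] at this
      exact absurd this (by decide)
  · have := pvToDigits_inj _ _ h
    omega

lemma pvToChars_mem {a : Int} {c : Char} (h : c ∈ PySem.Int.toChars a) :
    c.isDigit = true ∨ c = '-' := by
  unfold PySem.Int.toChars at h
  split_ifs at h with ha
  · rcases List.mem_cons.mp h with h | h
    · exact Or.inr h
    · exact Or.inl (pvToDigits_isDigit h)
  · exact Or.inl (pvToDigits_isDigit h)

lemma pvToChars_ne_comma {a : Int} {c : Char} (h : c ∈ PySem.Int.toChars a) : c ≠ ',' := by
  rcases pvToChars_mem h with h' | h' <;> intro e <;> rw [e] at h' <;> exact absurd h' (by decide)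

lemma pvSplitAt {α : Type} (x : α) :
    ∀ (a1 a2 t1 t2 : List α), x ∉ a1 → x ∉ a2 →
      a1 ++ x :: t1 = a2 ++ x :: t2 → a1 = a2 ∧ t1 = t2 := by
  intro a1
  induction a1 with
  | nil =>
    intro a2 t1 t2 _ h2 h
    cases a2 with
    | nil => simpa using h
    | cons b bs =>
      exfalso
      simp at h
      exact h2 (h.1 ▸ List.mem_cons_self ..)
  | cons a as ih =>
    intro a2 t1 t2 h1 h2 h
    cases a2 with
    | nil =>
      exfalso
      simp at h
      exact h1 (h.1 ▸ List.mem_cons_self ..)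
    | cons b bs =>
      simp only [List.cons_append, List.cons.injEq] at h
      obtain ⟨rfl, h⟩ := h
      obtain ⟨e1, e2⟩ := ih bs t1 t2 (fun hx => h1 (List.mem_cons_of_mem _ hx))
        (fun hx => h2 (List.mem_cons_of_mem _ hx)) h
      exact ⟨by rw [e1], e2⟩

lemma pvLabel_inj : ∀ o1 o2 : Option (Int × Int), pvLabel o1 = pvLabel o2 → o1 = o2 := by
  intro o1 o2 h
  match o1, o2 with
  | none, none => rfl
  | none, some (x, y) => exact absurd (congrArg (·.headD ' ') h) (by simp [pvLabel])
  | some (x, y), none => exact absurd (congrArg (·.headD ' ') h) (by simp [pvLabel])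
  | some (x1, y1), some (x2, y2) =>
    simp only [pvLabel, List.cons.injEq, true_and] at h
    obtain ⟨ex, h⟩ := pvSplitAt ',' _ _ _ _ (fun hm => pvToChars_ne_comma hm rfl)
      (fun hm => pvToChars_ne_comma hm rfl) h
    simp only [List.cons.injEq, true_and] at h
    have ey : PySem.Int.toChars y1 = PySem.Int.toChars y2 := by simpa using h
    rw [pvToChars_inj _ _ ex, pvToChars_inj _ _ ey]

lemma pvLabel_ne_dot (c : Int × Int) : pvLabel (some c) ≠ ['.'] := by
  intro h
  exact absurd (pvLabel_inj (some c) none h) (by simp)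

-- ---- Section 2: both per-cell computations against one classification function ----

def pvD (g c : Int × Int) : Int := |c.1 - g.1| + |c.2 - g.2|

def pvMin (g : Int × Int) : List (Int × Int) → Int
  | [] => 0
  | c :: t => t.foldl (fun a c' => min a (pvD g c')) (pvD g c)

def pvCell (g : Int × Int) (l : List (Int × Int)) : Option (Int × Int) :=
  let f := l.filter (fun c => pvD g c == pvMin g l)
  if f.length = 1 then some (f.headD (0, 0)) else none

lemma pvM_le (g : Int × Int) (t : List (Int × Int)) (b : Int) :
    t.foldl (fun a c => min a (pvD g c)) b ≤ b := by
  have h := (PySem.List.foldl_min_le (t.map (pvD g)) b).1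
  rwa [List.foldl_map] at h

lemma pvM_lb (g : Int × Int) (t : List (Int × Int)) (b : Int) :
    ∀ c ∈ t, t.foldl (fun a c => min a (pvD g c)) b ≤ pvD g c := by
  intro c hc
  have h := (PySem.List.foldl_min_le (t.map (pvD g)) b).2 (pvD g c) (List.mem_map_of_mem hc)
  rwa [List.foldl_map] at h

lemma pvM_mem (g : Int × Int) (t : List (Int × Int)) (b : Int) :
    t.foldl (fun a c => min a (pvD g c)) b = b ∨
      ∃ c ∈ t, t.foldl (fun a c => min a (pvD g c)) b = pvD g c := by
  have h := PySem.List.foldl_min_mem (t.map (pvD g)) b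
  rw [List.foldl_map] at h
  rcases h with h | h
  · exact Or.inl h
  · rcases List.mem_map.mp h with ⟨c, hc, e⟩
    exact Or.inr ⟨c, hc, e.symm⟩

lemma pvMin_le (g : Int × Int) (c : Int × Int) (t : List (Int × Int)) :
    ∀ o ∈ c :: t, pvMin g (c :: t) ≤ pvD g o := by
  intro o ho
  rcases List.mem_cons.mp ho with rfl | ho
  · exact pvM_le g t (pvD g o)
  · exact pvM_lb g t (pvD g c) o ho

lemma pvMin_attained (g : Int × Int) (c : Int × Int) (t : List (Int × Int)) :
    ∃ m ∈ c :: t, pvD g m = pvMin g (c :: t) := by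
  rcases pvM_mem g t (pvD g c) with h | ⟨m, hm, he⟩
  · exact ⟨c, List.mem_cons_self .., by simp [pvMin, h]⟩
  · exact ⟨m, List.mem_cons_of_mem _ hm, by simp [pvMin, he]⟩

lemma pvFsd_loop (g : Int × Int) :
    ∀ (l : List (Int × Int)) (b : Int) (acc : List (Int × Int)),
      l.foldl (fun st c =>
          match st.1 with
          | none => (some (|c.1 - g.1| + |c.2 - g.2|), [c])
          | some bd =>
            if |c.1 - g.1| + |c.2 - g.2| < bd then (some (|c.1 - g.1| + |c.2 - g.2|), [c])
            else if |c.1 - g.1| + |c.2 - g.2| == bd then (some bd, st.2 ++ [c])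
            else st)
        ((some b : Option Int), acc)
      = (some (l.foldl (fun a c => min a (pvD g c)) b),
         if l.foldl (fun a c => min a (pvD g c)) b < b then
           l.filter (fun c => pvD g c == l.foldl (fun a c' => min a (pvD g c')) b)
         else acc ++ l.filter (fun c => pvD g c == b)) := by
  intro l
  induction l with
  | nil => intro b acc; simp
  | cons c t ih =>
    intro b acc
    have hd : (|c.1 - g.1| + |c.2 - g.2|) = pvD g c := rfl
    by_cases h1 : pvD g c < b
    · simp only [List.foldl_cons, hd, if_pos h1]
      rw [ih (pvD g c) [c]]
      have hmin : min b (pvD g c) = pvD g c := min_eq_right (le_of_lt h1)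
      have hM : (t.foldl (fun a c' => min a (pvD g c')) (pvD g c)) ≤ pvD g c := pvM_le g t _
      simp only [List.foldl_cons, hd, hmin]
      by_cases h2 : t.foldl (fun a c' => min a (pvD g c')) (pvD g c) < pvD g c
      · rw [if_pos h2, if_pos (lt_trans h2 h1)]
        have hne : (pvD g c == t.foldl (fun a c' => min a (pvD g c')) (pvD g c)) = false := by
          simp only [beq_eq_false_iff_ne, ne_eq]; omega
        rw [List.filter_cons, hne]
        simp
      · have he : t.foldl (fun a c' => min a (pvD g c')) (pvD g c) = pvD g c :=
          le_antisymm hM (not_lt.mp h2)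
        have h1' : t.foldl (fun a c' => min a (pvD g c')) (pvD g c) < b := by rw [he]; exact h1
        rw [if_neg h2, if_pos h1']
        rw [List.filter_cons,
          show (pvD g c == t.foldl (fun a c' => min a (pvD g c')) (pvD g c)) = true by simp [he]]
        simp [he]
    · by_cases h2 : pvD g c = b
      · simp only [List.foldl_cons, hd, if_neg h1,
          if_pos (show (pvD g c == b) = true by simp [h2])]
        rw [ih b (acc ++ [c])]
        have hmin : min b (pvD g c) = b := by omega
        simp only [List.foldl_cons, hd, hmin]
        by_cases h3 : t.foldl (fun a c' => min a (pvD g c')) b < b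
        · rw [if_pos h3, if_pos h3]
          have hne : (pvD g c == t.foldl (fun a c' => min a (pvD g c')) b) = false := by
            simp only [beq_eq_false_iff_ne, ne_eq]; omega
          rw [List.filter_cons, hne]
          simp
        · rw [if_neg h3, if_neg h3]
          rw [List.filter_cons, show (pvD g c == b) = true by simp [h2]]
          simp
      · have h3 : b < pvD g c := by omega
        simp only [List.foldl_cons, hd, if_neg h1,
          if_neg (show ¬ (pvD g c == b) = true by simp [h2])]
        rw [ih b acc]
        have hmin : min b (pvD g c) = b := by omega
        simp only [List.foldl_cons, hd, hmin]
        by_cases h4 : t.foldl (fun a c' => min a (pvD g c')) b < b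
        · rw [if_pos h4, if_pos h4]
          have hne : (pvD g c == t.foldl (fun a c' => min a (pvD g c')) b) = false := by
            simp only [beq_eq_false_iff_ne, ne_eq]; omega
          rw [List.filter_cons, hne]
          simp
        · rw [if_neg h4, if_neg h4]
          rw [List.filter_cons, show (pvD g c == b) = false by simp [h2]]
          simp

lemma pvFsd_eq (g : Int × Int) (c : Int × Int) (t : List (Int × Int)) :
    find_shortest_dist g (c :: t) =
      (c :: t).filter (fun c' => pvD g c' == pvMin g (c :: t)) := by
  unfold find_shortest_dist
  simp only [List.foldl_cons]
  rw [pvFsd_loop g t (|c.1 - g.1| + |c.2 - g.2|) [c]]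
  have hd : (|c.1 - g.1| + |c.2 - g.2|) = pvD g c := rfl
  simp only [hd, pvMin]
  have hM : (t.foldl (fun a c' => min a (pvD g c')) (pvD g c)) ≤ pvD g c := pvM_le g t _
  by_cases h2 : t.foldl (fun a c' => min a (pvD g c')) (pvD g c) < pvD g c
  · rw [if_pos h2]
    have hne : (pvD g c == t.foldl (fun a c' => min a (pvD g c')) (pvD g c)) = false := by
      simp only [beq_eq_false_iff_ne, ne_eq]; omega
    rw [List.filter_cons, hne]
    simp
  · have he : t.foldl (fun a c' => min a (pvD g c')) (pvD g c) = pvD g c :=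
      le_antisymm hM (not_lt.mp h2)
    rw [if_neg h2, List.filter_cons,
      show (pvD g c == t.foldl (fun a c' => min a (pvD g c')) (pvD g c)) = true by simp [he]]
    simp [he]

lemma pvCellA (g : Int × Int) (c : Int × Int) (t : List (Int × Int)) :
    (if (find_shortest_dist g (c :: t)).length == 1 then
        some ((find_shortest_dist g (c :: t)).headD (0, 0))
      else none) = pvCell g (c :: t) := by
  rw [pvFsd_eq]
  simp only [pvCell, beq_iff_eq]

lemma pvMin_perm (g : Int × Int) : ∀ {l l' : List (Int × Int)}, l.Perm l' → pvMin g l = pvMin g l' := by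
  intro l l' h
  cases l with
  | nil => rw [List.nil_perm.mp h]
  | cons c t =>
    cases l' with
    | nil => simpa using h.length_eq
    | cons c' t' =>
      have hmm : ((c :: t).map (pvD g)).Perm ((c' :: t').map (pvD g)) := h.map _
      obtain ⟨m, hm, hme⟩ := pvMin_attained g c t
      obtain ⟨m', hm', hme'⟩ := pvMin_attained g c' t'
      have h1 := pvMin_le g c t
      have h2 := pvMin_le g c' t'
      exact le_antisymm (hme' ▸ h1 m' (h.symm.subset hm')) (hme ▸ h2 m (h.subset hm))

lemma pvCell_perm (g : Int × Int) {l l' : List (Int × Int)} (h : l.Perm l') :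
    pvCell g l = pvCell g l' := by
  have hmin := pvMin_perm g h
  have hf : (l.filter (fun c => pvD g c == pvMin g l)).Perm
      (l'.filter (fun c => pvD g c == pvMin g l')) := by
    rw [← hmin]
    exact h.filter _
  simp only [pvCell]
  rw [hf.length_eq]
  by_cases hl : (l'.filter (fun c => pvD g c == pvMin g l')).length = 1
  · rw [if_pos hl, if_pos hl]
    rcases e : l'.filter (fun c => pvD g c == pvMin g l') with _ | ⟨x, s⟩
    · rw [e] at hl; simp at hl
    · rw [e] at hl
      simp only [List.length_cons] at hl
      have hs : s = [] := List.length_eq_zero_iff.mp (by omega)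
      subst hs
      rw [e] at hf
      rw [List.perm_singleton.mp hf]
  · rw [if_neg hl, if_neg hl]

-- pvCell = some c ↔ the filter is exactly [c]
lemma pvCell_eq_some_iff (g : Int × Int) (l : List (Int × Int)) (c : Int × Int) :
    pvCell g l = some c ↔ l.filter (fun o => pvD g o == pvMin g l) = [c] := by
  simp only [pvCell]
  constructor
  · intro h
    split_ifs at h with hl
    · rcases e : l.filter (fun o => pvD g o == pvMin g l) with _ | ⟨a, s⟩
      · rw [e] at hl; simp at hl
      · rw [e] at hl
        simp only [List.length_cons] at hl
        have hs : s = [] := List.length_eq_zero_iff.mp (by omega)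
        subst hs
        rw [e] at h
        simp only [List.headD_cons, Option.some.injEq] at h
        rw [h]
  · intro h
    rw [h]
    simp

lemma pvCell_mem {g : Int × Int} {l : List (Int × Int)} {c : Int × Int}
    (h : pvCell g l = some c) : c ∈ l := by
  rw [pvCell_eq_some_iff] at h
  have : c ∈ l.filter (fun o => pvD g o == pvMin g l) := by rw [h]; exact List.mem_cons_self ..
  exact (List.mem_filter.mp this).1

lemma pvCountP_pos {α : Type} (p : α → Bool) {l : List α} {a : α}
    (ha : a ∈ l) (hp : p a = true) : 1 ≤ l.countP p := by
  rw [List.countP_eq_length_filter]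
  exact List.length_pos_of_mem (List.mem_filter.mpr ⟨ha, hp⟩)

-- B's strict-domination count equals the unique-nearest classification
lemma pvWins_iff (p : Int × Int) (c : Int × Int) (c0 : Int × Int) (t0 : List (Int × Int))
    (hc : c ∈ c0 :: t0) :
    ((c0 :: t0).countP (fun o => pvD p o ≤ pvD p c) = 1) ↔ pvCell p (c0 :: t0) = some c := by
  set l := c0 :: t0 with hl
  have hminle : ∀ o ∈ l, pvMin p l ≤ pvD p o := pvMin_le p c0 t0
  have hminatt : ∃ m ∈ l, pvD p m = pvMin p l := pvMin_attained p c0 t0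
  constructor
  · intro h
    have hcf : c ∈ l.filter (fun o => decide (pvD p o ≤ pvD p c)) :=
      List.mem_filter.mpr ⟨hc, by simp⟩
    have hflen : (l.filter (fun o => decide (pvD p o ≤ pvD p c))).length = 1 := by
      rw [← List.countP_eq_length_filter]; exact h
    have hfeq : l.filter (fun o => decide (pvD p o ≤ pvD p c)) = [c] := by
      rcases e : l.filter (fun o => decide (pvD p o ≤ pvD p c)) with _ | ⟨a, s⟩
      · rw [e] at hcf; simp at hcf
      · rw [e] at hflen hcf
        simp only [List.length_cons] at hflen
        have hs : s = [] := List.length_eq_zero_iff.mp (by omega)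
        subst hs
        simp only [List.mem_cons, List.not_mem_nil, or_false] at hcf
        rw [hcf]
    have hminc : pvMin p l = pvD p c := by
      obtain ⟨m, hm, hme⟩ := hminatt
      have hmle : pvD p m ≤ pvD p c := hme ▸ hminle c hc
      have : m ∈ l.filter (fun o => decide (pvD p o ≤ pvD p c)) :=
        List.mem_filter.mpr ⟨hm, by simpa using hmle⟩
      rw [hfeq] at this
      simp only [List.mem_cons, List.not_mem_nil, or_false] at this
      rw [← hme, this]
    rw [pvCell_eq_some_iff]
    have hsub : ∀ o ∈ l, (pvD p o == pvMin p l) = true → decide (pvD p o ≤ pvD p c) = true := by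
      intro o _ ho
      rw [beq_iff_eq] at ho
      simp [ho, hminc]
    have hle : l.countP (fun o => pvD p o == pvMin p l) ≤ 1 := by
      calc l.countP (fun o => pvD p o == pvMin p l)
          ≤ l.countP (fun o => decide (pvD p o ≤ pvD p c)) := List.countP_mono_left hsub
        _ = 1 := h
    have hpos : 1 ≤ l.countP (fun o => pvD p o == pvMin p l) := pvCountP_pos _ hc (by simp [hminc])
    have hone : (l.filter (fun o => pvD p o == pvMin p l)).length = 1 := by
      rw [← List.countP_eq_length_filter]; omega
    have hcmem : c ∈ l.filter (fun o => pvD p o == pvMin p l) :=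
      List.mem_filter.mpr ⟨hc, by simp [hminc]⟩
    rcases e : l.filter (fun o => pvD p o == pvMin p l) with _ | ⟨a, s⟩
    · rw [e] at hcmem; simp at hcmem
    · rw [e] at hone hcmem
      simp only [List.length_cons] at hone
      have hs : s = [] := List.length_eq_zero_iff.mp (by omega)
      subst hs
      simp only [List.mem_cons, List.not_mem_nil, or_false] at hcmem
      rw [hcmem]
  · intro h
    have hfeq := (pvCell_eq_some_iff p l c).mp h
    have hcmin : pvD p c = pvMin p l := by
      have : c ∈ l.filter (fun o => pvD p o == pvMin p l) := by
        rw [hfeq]; exact List.mem_cons_self ..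
      have := (List.mem_filter.mp this).2
      simpa using this
    have hsub : ∀ o ∈ l, decide (pvD p o ≤ pvD p c) = true → (pvD p o == pvMin p l) = true := by
      intro o ho hle
      rw [decide_eq_true_iff] at hle
      have := hminle o ho
      rw [beq_iff_eq]
      omega
    have hle : l.countP (fun o => decide (pvD p o ≤ pvD p c)) ≤ 1 := by
      calc l.countP (fun o => decide (pvD p o ≤ pvD p c))
          ≤ l.countP (fun o => pvD p o == pvMin p l) := List.countP_mono_left hsub
        _ = 1 := by rw [List.countP_eq_length_filter, hfeq]; simp
    have hpos : 1 ≤ l.countP (fun o => decide (pvD p o ≤ pvD p c)) := pvCountP_pos _ hc (by simp)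
    exact Nat.le_antisymm hle hpos

-- ---- Section 3: grid shape, edge set, counter and max lemmas ----

lemma pvPyGet_neg_one {α : Type} (l : List α) : PySem.List.pyGet? l (-1) = l.getLast? := by
  cases l with
  | nil => rfl
  | cons a t =>
    simp only [PySem.List.pyGet?, PySem.List.pyIdx?]
    norm_num
    simp [List.getLast?_eq_getElem?]

lemma pvSlice_1_neg1 {α : Type} (l : List α) :
    PySem.List.slice l (some 1) (some (-1)) = l.tail.dropLast := by
  simp [PySem.List.slice]
  cases l with
  | nil => simp
  | cons a t =>
    simp [List.dropLast_eq_take]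
    try (congr 1; omega)

lemma pvMem_foldl_add {α β : Type} [BEq α] [LawfulBEq α] (f : β → α) :
    ∀ (l : List β) (s : PySem.Set α) (x : α),
      (x ∈ l.foldl (fun s c => PySem.Set.add s (f c)) s) ↔ x ∈ s ∨ ∃ c ∈ l, f c = x := by
  intro l
  induction l with
  | nil => simp
  | cons c t ih =>
    intro s x
    rw [List.foldl_cons, ih, PySem.Set.mem_add]
    simp only [List.mem_cons, eq_comm]
    constructor
    · rintro ((hs | he) | ⟨c', hc', hx⟩)
      · exact Or.inl hs
      · exact Or.inr ⟨c, Or.inl rfl, he⟩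
      · exact Or.inr ⟨c', Or.inr hc', hx⟩
    · rintro (hs | ⟨c', (rfl | hc'), hx⟩)
      · exact Or.inl (Or.inl hs)
      · exact Or.inl (Or.inr hx)
      · exact Or.inr ⟨c', hc', hx⟩

lemma pvMem_foldl_add2 {α β : Type} [BEq α] [LawfulBEq α] (f g : β → α) :
    ∀ (l : List β) (s : PySem.Set α) (x : α),
      (x ∈ l.foldl (fun s c => PySem.Set.add (PySem.Set.add s (f c)) (g c)) s) ↔
        x ∈ s ∨ ∃ c ∈ l, f c = x ∨ g c = x := by
  intro l
  induction l with
  | nil => simp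
  | cons c t ih =>
    intro s x
    rw [List.foldl_cons, ih, PySem.Set.mem_add, PySem.Set.mem_add]
    simp only [List.mem_cons, eq_comm]
    constructor
    · rintro ((((hs | he) | he) | ⟨c', hc', hx⟩))
      · exact Or.inl hs
      · exact Or.inr ⟨c, Or.inl rfl, Or.inl he⟩
      · exact Or.inr ⟨c, Or.inl rfl, Or.inr he⟩
      · exact Or.inr ⟨c', Or.inr hc', hx⟩
    · rintro (hs | ⟨c', (rfl | hc'), hx⟩)
      · exact Or.inl (Or.inl (Or.inl hs))
      · rcases hx with hx | hx
        · exact Or.inl (Or.inl (Or.inr hx))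
        · exact Or.inl (Or.inr hx)
      · exact Or.inr ⟨c', hc', hx⟩

lemma pvGetD_insert_zero_fold {α : Type} [BEq α] [LawfulBEq α] [DecidableEq α] :
    ∀ (E : List α) (d : PySem.Dict α Int) (k : α),
      (E.foldl (fun d e => d.insert e (0 : Int)) d).getD k 0 = if k ∈ E then 0 else d.getD k 0 := by
  intro E
  induction E with
  | nil => intro d k; simp
  | cons e t ih =>
    intro d k
    rw [List.foldl_cons, ih, PySem.Dict.getD_insert]
    by_cases h1 : k ∈ t <;> by_cases h2 : k = e <;> simp [h1, h2]

lemma pvFoldlMax_eq (a : Int) (t ys : List Int)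
    (h0 : (0 : Int) = a ∨ (0 : Int) ∈ t)
    (h1 : ∀ z : Int, (z = a ∨ z ∈ t) → z ≤ ys.foldl max 0)
    (h2 : ∀ z ∈ ys, z ≤ t.foldl max a) :
    t.foldl max a = ys.foldl max 0 := by
  have hA := PySem.List.le_foldl_max t a
  have hAm := PySem.List.foldl_max_mem t a
  have hBm := PySem.List.foldl_max_mem ys 0
  have h0A : 0 ≤ t.foldl max a := by
    rcases h0 with h | h
    · exact (le_of_eq h).trans hA.1
    · exact hA.2 0 h
  apply le_antisymm
  · rcases hAm with he | hm
    · rw [he]; exact h1 a (Or.inl rfl)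
    · exact h1 _ (Or.inr hm)
  · rcases hBm with he | hm
    · rw [he]; exact h0A
    · exact h2 _ hm

lemma pvMax_perm {xs ys : List Int} (h : xs.Perm ys) :
    PySem.List.max? xs (fun v => v) = PySem.List.max? ys (fun v => v) := by
  cases xs with
  | nil => rw [List.nil_perm.mp h]
  | cons x t =>
    cases ys with
    | nil => simpa using h.length_eq
    | cons y s =>
      rw [PySem.List.max?_id_cons, PySem.List.max?_id_cons]
      congr 1
      have hA := PySem.List.le_foldl_max t x
      have hAm := PySem.List.foldl_max_mem t x
      have hB := PySem.List.le_foldl_max s y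
      have hBm := PySem.List.foldl_max_mem s y
      have hmemA : t.foldl max x ∈ x :: t := by
        rcases hAm with he | hm
        · rw [he]; exact List.mem_cons_self ..
        · exact List.mem_cons_of_mem _ hm
      have hmemB : s.foldl max y ∈ y :: s := by
        rcases hBm with he | hm
        · rw [he]; exact List.mem_cons_self ..
        · exact List.mem_cons_of_mem _ hm
      have hleA : ∀ z ∈ x :: t, z ≤ t.foldl max x := by
        intro z hz
        rcases List.mem_cons.mp hz with rfl | hz
        · exact hA.1
        · exact hA.2 _ hz
      have hleB : ∀ z ∈ y :: s, z ≤ s.foldl max y := by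
        intro z hz
        rcases List.mem_cons.mp hz with rfl | hz
        · exact hB.1
        · exact hB.2 _ hz
      exact le_antisymm (hleB _ (h.subset hmemA)) (hleA _ (h.symm.subset hmemB))

lemma pvMem_cells {mx my : Int} {p : Int × Int} :
    p ∈ altCells mx my ↔ (0 ≤ p.1 ∧ p.1 ≤ mx ∧ 0 ≤ p.2 ∧ p.2 ≤ my) := by
  rw [altCells, List.mem_flatMap]
  constructor
  · rintro ⟨i, hi, hp⟩
    rw [List.mem_map] at hp
    rcases hp with ⟨j, hj, rfl⟩
    rw [PySem.List.mem_pyRange_one] at hi hj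
    simp only []
    omega
  · intro h
    refine ⟨p.2, by rw [PySem.List.mem_pyRange_one]; omega, ?_⟩
    rw [List.mem_map]
    exact ⟨p.1, by rw [PySem.List.mem_pyRange_one]; omega, by simp⟩

lemma pvPyRange_nil (a b : Int) (h : b ≤ a) : PySem.List.pyRange a b 1 = [] := by
  rw [List.eq_nil_iff_forall_not_mem]
  intro x hx
  rw [PySem.List.mem_pyRange_one] at hx
  omega

lemma pvRows_last (m : Int) (h : 0 ≤ m) :
    (PySem.List.pyRange 0 (m + 1) 1).getLast? = some m := by
  rw [PySem.List.pyRange_one_append 0 m (m + 1) h (by omega),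
    PySem.List.pyRange_one_cons (show m < m + 1 by omega),
    pvPyRange_nil (m + 1) (m + 1) le_rfl]
  exact List.getLast?_concat

lemma pvRows_mid (m : Int) (h : 0 ≤ m) :
    (PySem.List.pyRange 0 (m + 1) 1).tail.dropLast = PySem.List.pyRange 1 m 1 := by
  rw [PySem.List.pyRange_one_cons (show (0 : Int) < m + 1 by omega)]
  simp only [List.tail_cons, zero_add]
  by_cases h1 : 1 ≤ m
  · rw [PySem.List.pyRange_one_append 1 m (m + 1) h1 (by omega),
      PySem.List.pyRange_one_cons (show m < m + 1 by omega),
      pvPyRange_nil (m + 1) (m + 1) le_rfl]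
    exact List.dropLast_concat
  · have hm : m = 0 := by omega
    subst hm
    simp only [zero_add]
    rw [pvPyRange_nil 1 1 le_rfl, pvPyRange_nil 1 0 (by omega)]
    rfl

lemma pvPyGet_zero {α : Type} (a : α) (l : List α) :
    PySem.List.pyGet? (a :: l) (0 : Int) = some a := by
  have h := PySem.List.pyGet?_natCast (a :: l) 0
  simpa using h

lemma pvE_char (cf : Int × Int → Option (Int × Int)) (mx my : Int) (hmy : 0 ≤ my)
    (hw : 0 ≤ mx ∨ my ≤ 1) (x : List Char) :
    x ∈ find_edges ((PySem.List.pyRange 0 (my + 1) 1).map (fun i =>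
        (PySem.List.pyRange 0 (mx + 1) 1).map (fun j => cf (j, i)))) ↔
      x = ['.'] ∨ ∃ p ∈ altCells mx my,
        (p.1 = 0 ∨ p.1 = mx ∨ p.2 = 0 ∨ p.2 = my) ∧ pvLabel (cf p) = x := by
  simp only [find_edges]
  have h0 : (PySem.List.pyGet? ((PySem.List.pyRange 0 (my + 1) 1).map (fun i =>
      (PySem.List.pyRange 0 (mx + 1) 1).map (fun j => cf (j, i)))) 0).getD []
      = (PySem.List.pyRange 0 (mx + 1) 1).map (fun j => cf (j, 0)) := by
    rw [PySem.List.pyRange_one_cons (show (0 : Int) < my + 1 by omega), List.map_cons,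
      pvPyGet_zero]
    rfl
  have hlast : (PySem.List.pyGet? ((PySem.List.pyRange 0 (my + 1) 1).map (fun i =>
      (PySem.List.pyRange 0 (mx + 1) 1).map (fun j => cf (j, i)))) (-1)).getD []
      = (PySem.List.pyRange 0 (mx + 1) 1).map (fun j => cf (j, my)) := by
    rw [pvPyGet_neg_one, List.getLast?_map, pvRows_last my hmy]
    rfl
  have hmid : PySem.List.slice ((PySem.List.pyRange 0 (my + 1) 1).map (fun i =>
      (PySem.List.pyRange 0 (mx + 1) 1).map (fun j => cf (j, i)))) (some 1) (some (-1))
      = (PySem.List.pyRange 1 my 1).map (fun i =>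
          (PySem.List.pyRange 0 (mx + 1) 1).map (fun j => cf (j, i))) := by
    rw [pvSlice_1_neg1, ← List.map_tail, ← List.map_dropLast, pvRows_mid my hmy]
  rw [h0, hlast, hmid]
  rw [List.foldl_map, List.foldl_map, List.foldl_map]
  have hbody : ∀ (acc : PySem.Set (List Char)) (i : Int), i ∈ PySem.List.pyRange 1 my 1 →
      (fun (s : PySem.Set (List Char)) (i : Int) =>
        PySem.Set.add (PySem.Set.add s (pvLabel ((PySem.List.pyGet?
            ((PySem.List.pyRange 0 (mx + 1) 1).map (fun j => cf (j, i))) 0).getD none)))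
          (pvLabel ((PySem.List.pyGet?
            ((PySem.List.pyRange 0 (mx + 1) 1).map (fun j => cf (j, i))) (-1)).getD none))) acc i
      = (fun (s : PySem.Set (List Char)) (i : Int) =>
          PySem.Set.add (PySem.Set.add s (pvLabel (cf (0, i)))) (pvLabel (cf (mx, i)))) acc i := by
    intro acc i hi
    rw [PySem.List.mem_pyRange_one] at hi
    have hmx : 0 ≤ mx := by rcases hw with h | h; exact h; omega
    have hc : (PySem.List.pyGet? ((PySem.List.pyRange 0 (mx + 1) 1).map
        (fun j => cf (j, i))) 0).getD none = cf (0, i) := by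
      rw [PySem.List.pyRange_one_cons (show (0 : Int) < mx + 1 by omega), List.map_cons,
        pvPyGet_zero]
      rfl
    have hl : (PySem.List.pyGet? ((PySem.List.pyRange 0 (mx + 1) 1).map
        (fun j => cf (j, i))) (-1)).getD none = cf (mx, i) := by
      rw [pvPyGet_neg_one, List.getLast?_map, pvRows_last mx hmx]
      rfl
    simp only []
    rw [hc, hl]
  rw [PySem.List.foldl_congr_mem (PySem.List.pyRange 1 my 1)
    (fun (s : PySem.Set (List Char)) (i : Int) =>
      PySem.Set.add (PySem.Set.add s (pvLabel ((PySem.List.pyGet?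
          ((PySem.List.pyRange 0 (mx + 1) 1).map (fun j => cf (j, i))) 0).getD none)))
        (pvLabel ((PySem.List.pyGet?
          ((PySem.List.pyRange 0 (mx + 1) 1).map (fun j => cf (j, i))) (-1)).getD none)))
    (fun (s : PySem.Set (List Char)) (i : Int) =>
      PySem.Set.add (PySem.Set.add s (pvLabel (cf (0, i)))) (pvLabel (cf (mx, i))))
    _ hbody]
  rw [pvMem_foldl_add2 (fun i => pvLabel (cf (0, i))) (fun i => pvLabel (cf (mx, i))),
    pvMem_foldl_add (fun j => pvLabel (cf (j, my))),
    pvMem_foldl_add (fun j => pvLabel (cf (j, 0)))]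
  have he0 : (x ∈ PySem.Set.add PySem.Set.empty ['.']) ↔ x = ['.'] := by
    rw [PySem.Set.mem_add]
    simp [PySem.Set.empty]
  rw [he0]
  constructor
  · rintro (((hdot | ⟨j, hj, hx⟩) | ⟨j, hj, hx⟩) | ⟨i, hi, hx | hx⟩)
    · exact Or.inl hdot
    · rw [PySem.List.mem_pyRange_one] at hj
      exact Or.inr ⟨(j, 0), pvMem_cells.mpr ⟨by omega, by omega, by omega, by omega⟩,
        Or.inr (Or.inr (Or.inl rfl)), hx⟩
    · rw [PySem.List.mem_pyRange_one] at hj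
      exact Or.inr ⟨(j, my), pvMem_cells.mpr ⟨by omega, by omega, by omega, by omega⟩,
        Or.inr (Or.inr (Or.inr rfl)), hx⟩
    · rw [PySem.List.mem_pyRange_one] at hi
      have hmx : 0 ≤ mx := by rcases hw with h | h; exact h; omega
      exact Or.inr ⟨(0, i), pvMem_cells.mpr ⟨by omega, by omega, by omega, by omega⟩,
        Or.inl rfl, hx⟩
    · rw [PySem.List.mem_pyRange_one] at hi
      have hmx : 0 ≤ mx := by rcases hw with h | h; exact h; omega
      exact Or.inr ⟨(mx, i), pvMem_cells.mpr ⟨by omega, by omega, by omega, by omega⟩,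
        Or.inr (Or.inl rfl), hx⟩
  · rintro (hdot | ⟨⟨j, i⟩, hp, hb, hx⟩)
    · exact Or.inl (Or.inl (Or.inl hdot))
    · rw [pvMem_cells] at hp
      simp only [] at hp hb hx
      by_cases hi0 : i = 0
      · subst hi0
        exact Or.inl (Or.inl (Or.inr ⟨j, by rw [PySem.List.mem_pyRange_one]; omega, hx⟩))
      · by_cases himy : i = my
        · subst himy
          exact Or.inl (Or.inr ⟨j, by rw [PySem.List.mem_pyRange_one]; omega, hx⟩)
        · have hi : i ∈ PySem.List.pyRange 1 my 1 := by
            rw [PySem.List.mem_pyRange_one]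
            omega
          rcases hb with hj0 | hjmx | h' | h'
          · subst hj0
            exact Or.inr ⟨i, hi, Or.inl hx⟩
          · subst hjmx
            exact Or.inr ⟨i, hi, Or.inr hx⟩
          · exact absurd h' hi0
          · exact absurd h' himy

lemma pvMaxGetD_facts (z : Int) (zs : List Int) :
    (PySem.List.max? (z :: zs) (fun v => v)).getD 0 = zs.foldl max z := by
  rw [PySem.List.max?_id_cons]
  rfl

-- B's running-max loop with a skip condition is a foldl max over the mapped values
lemma pvAltFold {α : Type} (A : α → Bool) (r : α → Int) :
    ∀ (l : List α) (b : Int), 0 ≤ b →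
      l.foldl (fun best c => if A c then best else max best (r c)) b
        = (l.map (fun c => if A c then 0 else r c)).foldl max b := by
  intro l
  induction l with
  | nil => intro b _; simp
  | cons c t ih =>
    intro b hb
    simp only [List.foldl_cons, List.map_cons]
    cases hA : A c
    · simp only [Bool.false_eq_true, if_false]
      exact ih (max b (r c)) (le_trans hb (le_max_left _ _))
    · simp only [if_true]
      rw [max_eq_left hb]
      exact ih b hb

set_option maxHeartbeats 2000000 in
theorem pvMain (cs : List (Int × Int)) (hne : cs ≠ [])
    (hEy : ∃ c ∈ cs, 0 ≤ c.2)
    (hEx : (∃ c ∈ cs, 0 ≤ c.1) ∨ (∀ c ∈ cs, c.2 ≤ 1)) :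
    calc_max_area cs = calc_max_area_alt cs := by
  obtain ⟨c0, t0, hcs⟩ : ∃ c t, cs = c :: t := by
    cases cs with
    | nil => exact absurd rfl hne
    | cons c t => exact ⟨c, t, rfl⟩
  have hperm : (PySem.List.sorted2 cs (fun c => c.1) (fun c => c.2) false).Perm cs :=
    PySem.List.sorted2_perm cs _ _ false
  have hmax1 : PySem.List.max? ((PySem.List.sorted2 cs (fun c => c.1) (fun c => c.2) false).map
        (fun c => c.1)) (fun v => v)
      = PySem.List.max? (cs.map (fun c => c.1)) (fun v => v) := pvMax_perm (hperm.map _)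
  have hmax2 : PySem.List.max? ((PySem.List.sorted2 cs (fun c => c.1) (fun c => c.2) false).map
        (fun c => c.2)) (fun v => v)
      = PySem.List.max? (cs.map (fun c => c.2)) (fun v => v) := pvMax_perm (hperm.map _)
  obtain ⟨c1, t1, hscs⟩ : ∃ c t,
      PySem.List.sorted2 cs (fun c => c.1) (fun c => c.2) false = c :: t := by
    rcases e : PySem.List.sorted2 cs (fun c => c.1) (fun c => c.2) false with _ | ⟨c, t⟩
    · rw [e] at hperm
      rw [hcs] at hperm
      simpa using hperm.length_eq
    · exact ⟨c, t, rfl⟩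
  have hcell : ∀ (i j : Int),
      (if (find_shortest_dist (j, i)
            (PySem.List.sorted2 cs (fun c => c.1) (fun c => c.2) false)).length == 1 then
          some ((find_shortest_dist (j, i)
            (PySem.List.sorted2 cs (fun c => c.1) (fun c => c.2) false)).headD (0, 0))
        else none) = pvCell (j, i) cs := by
    intro i j
    rw [hscs, pvCellA]
    rw [← hscs]
    exact pvCell_perm _ hperm
  simp only [calc_max_area, calc_max_area_alt]
  rw [hmax1, hmax2]
  simp only [hcell]
  set mx := (PySem.List.max? (cs.map (fun c => c.1)) (fun v => v)).getD 0 with hmxd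
  set my := (PySem.List.max? (cs.map (fun c => c.2)) (fun v => v)).getD 0 with hmyd
  have hmax_facts : ∀ (f : Int × Int → Int),
      ((PySem.List.max? (cs.map f) (fun v => v)).getD 0 ∈ cs.map f) ∧
        (∀ z ∈ cs.map f, z ≤ (PySem.List.max? (cs.map f) (fun v => v)).getD 0) := by
    intro f
    rw [hcs]
    simp only [List.map_cons]
    rw [pvMaxGetD_facts]
    constructor
    · rcases PySem.List.foldl_max_mem (t0.map f) (f c0) with he | hm
      · rw [he]; exact List.mem_cons_self ..
      · exact List.mem_cons_of_mem _ hm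
    · intro z hz
      rcases List.mem_cons.mp hz with rfl | hz
      · exact (PySem.List.le_foldl_max (t0.map f) (f c0)).1
      · exact (PySem.List.le_foldl_max (t0.map f) (f c0)).2 _ hz
  have hmy : 0 ≤ my := by
    rcases hEy with ⟨c, hc, h0⟩
    have := (hmax_facts (fun c => c.2)).2 _ (List.mem_map_of_mem hc)
    omega
  have hw : 0 ≤ mx ∨ my ≤ 1 := by
    rcases hEx with ⟨c, hc, h0⟩ | hall
    · have := (hmax_facts (fun c => c.1)).2 _ (List.mem_map_of_mem hc)
      omega
    · right
      rcases List.mem_map.mp (hmax_facts (fun c => c.2)).1 with ⟨c, hc, he⟩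
      have := hall c hc
      omega
  -- A side: flattened board = labels of the cell list
  have hflat : (List.flatMap (fun sub => List.map pvLabel sub)
        (List.map (fun i => List.map (fun j => pvCell (j, i) cs)
          (PySem.List.pyRange 0 (mx + 1) 1)) (PySem.List.pyRange 0 (my + 1) 1)))
      = (altCells mx my).map (fun p => pvLabel (pvCell p cs)) := by
    rw [List.flatMap_map, altCells, List.map_flatMap]
    simp only [List.map_map]
    rfl
  rw [hflat]
  set P := altCells mx my with hPdef
  set ED := find_edges ((PySem.List.pyRange 0 (my + 1) 1).map (fun i =>
    (PySem.List.pyRange 0 (mx + 1) 1).map (fun j => pvCell (j, i) cs))) with hEDdef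
  set flatL := P.map (fun p => pvLabel (pvCell p cs)) with hflatLdef
  have hE : ∀ x, x ∈ ED ↔ x = ['.'] ∨ ∃ p ∈ P,
      (p.1 = 0 ∨ p.1 = mx ∨ p.2 = 0 ∨ p.2 = my) ∧ pvLabel (pvCell p cs) = x := by
    intro x
    rw [hEDdef, hPdef]
    exact pvE_char (fun p => pvCell p cs) mx my hmy hw x
  -- A-side counter → keys and values
  have hnodupA : ((ED.foldl (fun d e => d.insert e 0) (PySem.Dict.counter flatL)).keys).Nodup :=
    PySem.Dict.nodup_keys_foldl_insert ED (fun _ _ => 0) _ (PySem.Dict.nodup_keys_counter flatL)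
  have hkeysA : ((ED.foldl (fun d e => d.insert e 0) (PySem.Dict.counter flatL)).keys)
      = PySem.Set.update (PySem.Set.ofList flatL) ED := by
    have h := PySem.Dict.keys_foldl_insert ED (fun _ _ => (0 : Int)) (PySem.Dict.counter flatL)
    rw [PySem.Dict.keys_counter] at h
    exact h
  have hgetDA : ∀ k, (ED.foldl (fun d e => d.insert e 0) (PySem.Dict.counter flatL)).getD k 0
      = if k ∈ ED then (0 : Int) else ((flatL.count k : Nat) : Int) := by
    intro k
    rw [pvGetD_insert_zero_fold, PySem.Dict.getD_counter]
  rw [PySem.Dict.values_eq_map_keys _ hnodupA 0, hkeysA,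
    List.map_congr_left (fun k _ => hgetDA k)]
  set v : List Char → Int := fun k => if k ∈ ED then (0 : Int) else ((flatL.count k : Nat) : Int)
    with hvdef
  set K := PySem.Set.update (PySem.Set.ofList flatL) ED with hKdef
  clear_value mx my P ED flatL v K
  -- B side: replace the wins test by the classification, then flatten the loop
  have hwins : ∀ c ∈ cs, ∀ p : Int × Int, altWins cs c p = (pvCell p cs == some c) := by
    intro c hc p
    have hiff := pvWins_iff p c c0 t0 (hcs ▸ hc)
    rw [← hcs] at hiff
    simp only [altWins]
    have hdd : (fun o : Int × Int => decide (|o.1 - p.1| + |o.2 - p.2| ≤ |c.1 - p.1| + |c.2 - p.2|))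
        = (fun o : Int × Int => decide (pvD p o ≤ pvD p c)) := rfl
    rw [hdd]
    cases hcase : (pvCell p cs == some c) with
    | true =>
      rw [beq_iff_eq] at hcase
      simp [hiff.mpr hcase]
    | false =>
      have : ¬ pvCell p cs = some c := by
        intro h; rw [h] at hcase; simp at hcase
      have hn : cs.countP (fun o => decide (pvD p o ≤ pvD p c)) ≠ 1 := fun h => this (hiff.mp h)
      simpa using hn
  have hstep : ∀ (b : Int), ∀ c ∈ cs,
      (fun best c =>
        if (P.filter (altWins cs c)).any
            (fun p => p.1 == 0 || p.1 == mx || p.2 == 0 || p.2 == my) then best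
        else max best (((P.filter (altWins cs c)).length : Int))) b c
      = (fun best c =>
          if (P.filter (fun p => pvCell p cs == some c)).any
              (fun p => p.1 == 0 || p.1 == mx || p.2 == 0 || p.2 == my) then best
          else max best (((P.filter (fun p => pvCell p cs == some c)).length : Int))) b c := by
    intro b c hc
    have hfe : P.filter (altWins cs c) = P.filter (fun p => pvCell p cs == some c) :=
      List.filter_congr (fun p _ => by rw [hwins c hc p])
    simp only [hfe]
  rw [PySem.List.foldl_congr_mem' cs _ _ 0 (fun c hc b => hstep b c hc)]
  set brd : Int × Int → Bool := fun c =>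
    (P.filter (fun p => pvCell p cs == some c)).any
      (fun p => p.1 == 0 || p.1 == mx || p.2 == 0 || p.2 == my) with hbrddef
  set area : Int × Int → Int := fun c => ((P.filter (fun p => pvCell p cs == some c)).length : Int)
    with hareadef
  rw [pvAltFold brd area cs 0 le_rfl]
  set g : Int × Int → Int := fun c => if brd c then 0 else area c with hgdef
  -- counting bridge: label counts in flatL are areas
  have hcount : ∀ o : Int × Int, ((flatL.count (pvLabel (some o)) : Nat) : Int) = area o := by
    intro o
    rw [hareadef]
    simp only [hflatLdef]
    have hfe : P.filter ((fun x => x == pvLabel (some o)) ∘ fun p => pvLabel (pvCell p cs))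
        = P.filter (fun p => pvCell p cs == some o) := by
      refine List.filter_congr (fun p _ => ?_)
      simp only [Function.comp]
      cases hcase : (pvCell p cs == some o) with
      | true =>
        rw [beq_iff_eq] at hcase
        simp [hcase]
      | false =>
        have hne : pvCell p cs ≠ some o := by
          intro h; rw [h] at hcase; simp at hcase
        have : pvLabel (pvCell p cs) ≠ pvLabel (some o) := fun h => hne (pvLabel_inj _ _ h)
        simpa using this
    rw [List.count_eq_countP, List.countP_map, List.countP_eq_length_filter, hfe]
  -- '.' is always an edge, and hence in K with value 0
  have hdotE : ['.'] ∈ ED := (hE ['.']).mpr (Or.inl rfl)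
  have hKdot : ['.'] ∈ K := by
    rw [hKdef]
    exact (PySem.Set.mem_update _ _ _).mpr (Or.inr hdotE)
  have hvdot : v ['.'] = 0 := by rw [hvdef]; simp [hdotE]
  -- domination 1: every counter value is at most some g-value (or 0)
  have hdom1 : ∀ k ∈ K, v k ≤ (cs.map g).foldl max 0 := by
    intro k hk
    by_cases hkE : k ∈ ED
    · rw [hvdef]
      simp only [hkE, if_true]
      exact (PySem.List.le_foldl_max (cs.map g) 0).1
    · have hkfl : k ∈ flatL := by
        rw [hKdef] at hk
        rcases (PySem.Set.mem_update _ _ _).mp hk with h | h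
        · exact (PySem.Set.mem_ofList _ _).mp h
        · exact absurd h hkE
      rw [hflatLdef] at hkfl
      rcases List.mem_map.mp hkfl with ⟨p, hp, hpk⟩
      rcases hocase : pvCell p cs with _ | o
      · exfalso
        rw [hocase] at hpk
        exact hkE (hpk ▸ hdotE)
      · rw [hocase] at hpk
        have ho : o ∈ cs := pvCell_mem hocase
        have hbrd : brd o = false := by
          rw [hbrddef]
          simp only [List.any_eq_false]
          intro q hq
          rcases List.mem_filter.mp hq with ⟨hqP, hqo⟩
          rw [beq_iff_eq] at hqo
          intro hb
          apply hkE
          rw [← hpk]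
          refine (hE _).mpr (Or.inr ⟨q, hqP, ?_, by rw [hqo]⟩)
          simp at hb
          tauto
        have hvk : v k = g o := by
          rw [hvdef, hgdef]
          simp only [hkE, if_false, hbrd, Bool.false_eq_true, if_false]
          rw [← hpk, hcount]
        rw [hvk]
        exact (PySem.List.le_foldl_max (cs.map g) 0).2 _ (List.mem_map_of_mem ho)
  -- domination 2: every g-value is at most some counter value (or 0)
  have h0K : (0 : Int) ∈ K.map v := List.mem_map.mpr ⟨['.'], hKdot, hvdot⟩
  have hdom2 : ∀ c ∈ cs, ∃ k ∈ K, g c ≤ v k := by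
    intro c hc
    by_cases hbc : brd c = true
    · refine ⟨['.'], hKdot, ?_⟩
      rw [hvdot, hgdef]
      simp [hbc]
    · have hbc' : brd c = false := by simpa using hbc
      rcases hfcase : P.filter (fun p => pvCell p cs == some c) with _ | ⟨p1, ps⟩
      · refine ⟨['.'], hKdot, ?_⟩
        rw [hvdot, hgdef, hareadef]
        simp [hbc', hfcase]
      · have hp1 : p1 ∈ P ∧ pvCell p1 cs = some c := by
          have : p1 ∈ P.filter (fun p => pvCell p cs == some c) := by
            rw [hfcase]; exact List.mem_cons_self ..
          rcases List.mem_filter.mp this with ⟨h1, h2⟩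
          exact ⟨h1, by simpa using h2⟩
        set k := pvLabel (some c) with hkd
        have hkfl : k ∈ flatL := by
          rw [hflatLdef]
          refine List.mem_map.mpr ⟨p1, hp1.1, ?_⟩
          rw [hp1.2]
        have hkK : k ∈ K := by
          rw [hKdef]
          exact (PySem.Set.mem_update _ _ _).mpr (Or.inl ((PySem.Set.mem_ofList _ _).mpr hkfl))
        have hkE : k ∉ ED := by
          intro hkE
          rcases (hE k).mp hkE with hd | ⟨q, hqP, hqb, hql⟩
          · exact pvLabel_ne_dot c hd
          · have hqc : pvCell q cs = some c := pvLabel_inj _ _ hql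
            have : q ∈ P.filter (fun p => pvCell p cs == some c) :=
              List.mem_filter.mpr ⟨hqP, by simp [hqc]⟩
            have hany : brd c = true := by
              rw [hbrddef]
              refine List.any_eq_true.mpr ⟨q, this, ?_⟩
              rcases hqb with h | h | h | h <;> simp [h]
            rw [hany] at hbc'
            exact absurd hbc' (by simp)
        refine ⟨k, hkK, ?_⟩
        have : v k = area c := by
          rw [hvdef]
          simp only [hkE, if_false]
          rw [hkd, hcount]
        rw [this, hgdef]
        simp [hbc']
  -- finish: both sides are the max of comparable value sets containing 0
  rcases eK : K with _ | ⟨k0, ks⟩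
  · rw [eK] at hKdot
    simp at hKdot
  · rw [List.map_cons, PySem.List.max?_id_cons]
    simp only [Option.getD_some]
    apply pvFoldlMax_eq
    · rw [eK] at h0K
      rcases List.mem_map.mp h0K with ⟨k, hk, hvk⟩
      rcases List.mem_cons.mp hk with rfl | hk
      · exact Or.inl hvk.symm
      · exact Or.inr (List.mem_map.mpr ⟨k, hk, hvk⟩)
    · intro z hz
      have : ∃ k ∈ K, v k = z := by
        rw [eK]
        rcases hz with he | hm
        · exact ⟨k0, List.mem_cons_self .., he.symm⟩
        · rcases List.mem_map.mp hm with ⟨k, hk, hvk⟩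
          exact ⟨k, List.mem_cons_of_mem _ hk, hvk⟩
      rcases this with ⟨k, hk, hvk⟩
      rw [← hvk]
      exact hdom1 k hk
    · intro z hz
      rcases List.mem_map.mp hz with ⟨c, hc, rfl⟩
      rcases hdom2 c hc with ⟨k, hk, hle⟩
      refine le_trans hle ?_
      rw [eK] at hk
      rcases List.mem_cons.mp hk with rfl | hk
      · exact (PySem.List.le_foldl_max (ks.map v) (v k)).1
      · exact (PySem.List.le_foldl_max (ks.map v) (v k0)).2 _ (List.mem_map_of_mem hk)

-- ===== VERDICT (by name: the statement is the Claim_ definition above) =====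
theorem calc_max_area_spec : Claim_equal_calc_max_area := by
  intro cs hdom hpre
  obtain ⟨hne, hEy, hEx⟩ := hpre
  unfold Spec_calc_max_area
  exact pvMain cs hne hEy hEx
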